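-- pv_equiv track=rewrite | github.com/miroegres/AoC2025 | d04/p1.py | render_accessibility_overlay
-- ===== SOURCE A (Python) =====
-- def render_accessibility_overlay(grid, accessible_set):
--     """
--     Returns a new grid (list of strings) where accessible '@' are marked as 'x'.
--     Other characters remain the same.
--     """
--     out_rows = []
--     for r, row in enumerate(grid):
--         chars = list(row)
--         for c, ch in enumerate(chars):
--             if ch == '@' and (r, c) in accessible_set:
--                 chars[c] = 'x'
--         out_rows.append(''.join(chars))
--     return out_rows
-- ===== SOURCE B (Python) =====
-- def render_accessibility_overlay(grid, accessible_set):
--     out = [list(row) for row in grid]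
--     for r, c in accessible_set:
--         if 0 <= r < len(out) and 0 <= c < len(out[r]) and out[r][c] == '@':
--             out[r][c] = 'x'
--     return [''.join(row) for row in out]
-- ===== Notes on version B (the rewrite author's own statement) =====
-- stated objective: alternative
-- what changed: Instead of scanning every grid cell and testing membership in accessible_set per cell, B builds a mutable char-grid once and drives the marking from the sparse accessible_set with a bounds check per coordinate.
import Mathlib
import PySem

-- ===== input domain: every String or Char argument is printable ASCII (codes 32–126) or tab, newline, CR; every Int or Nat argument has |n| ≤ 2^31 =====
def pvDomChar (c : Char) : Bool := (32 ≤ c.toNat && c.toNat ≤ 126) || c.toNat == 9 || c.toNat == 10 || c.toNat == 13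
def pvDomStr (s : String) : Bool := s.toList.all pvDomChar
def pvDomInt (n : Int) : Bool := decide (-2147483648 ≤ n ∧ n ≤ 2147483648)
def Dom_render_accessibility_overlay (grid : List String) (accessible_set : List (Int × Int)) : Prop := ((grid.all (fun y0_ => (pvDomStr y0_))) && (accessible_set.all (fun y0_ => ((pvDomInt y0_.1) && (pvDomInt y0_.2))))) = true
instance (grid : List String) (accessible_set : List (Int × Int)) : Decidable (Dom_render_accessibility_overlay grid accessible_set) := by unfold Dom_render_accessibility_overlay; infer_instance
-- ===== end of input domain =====

-- B rebuilds the grid as mutable rows once and drives the marking from the sparse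
-- accessible_set (bounds-checked), instead of A's per-cell scan with a membership
-- test; same return value (alternative decomposition, no speed claim).

-- ===== PORT A =====
-- inner loop body of A: `if ch == '@' and (r, c) in accessible_set: chars[c] = 'x'`
def aInner (S : List (Int × Int)) (r : Int) (cs : List Char) (q : Int × Char) : List Char :=
  if q.2 = '@' ∧ (r, q.1) ∈ S then PySem.List.pySetD cs q.1 'x' else cs

-- outer loop body of A: rebuild one row and append it
def aOuter (S : List (Int × Int)) (out_rows : List String) (p : Int × String) : List String :=
  out_rows ++ [String.mk ((PySem.List.enumerate p.2.toList 0).foldl (aInner S p.1) p.2.toList)]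

def render_accessibility_overlay (grid : List String) (accessible_set : List (Int × Int)) : List String :=
  (PySem.List.enumerate grid 0).foldl (aOuter accessible_set) []

-- ===== PORT B =====
-- loop body of B: `if 0 <= r < len(out) and 0 <= c < len(out[r]) and out[r][c] == '@': out[r][c] = 'x'`
def bStep (g : List (List Char)) (p : Int × Int) : List (List Char) :=
  if 0 ≤ p.1 ∧ p.1 < (g.length : Int) ∧ 0 ≤ p.2 ∧
      p.2 < ((PySem.List.pyGetD g p.1 []).length : Int) ∧
      PySem.List.pyGetD (PySem.List.pyGetD g p.1 []) p.2 ' ' = '@' then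
    PySem.List.pySetD g p.1 (PySem.List.pySetD (PySem.List.pyGetD g p.1 []) p.2 'x')
  else g

def render_accessibility_overlay_alt (grid : List String) (accessible_set : List (Int × Int)) : List String :=
  (accessible_set.foldl bStep (grid.map String.toList)).map String.mk

-- ===== PRECONDITION & SPEC =====
def Spec_render_accessibility_overlay (grid : List String) (accessible_set : List (Int × Int)) (out : List String) : Prop := out = render_accessibility_overlay_alt grid accessible_set
instance (grid : List String) (accessible_set : List (Int × Int)) (out : List String) : Decidable (Spec_render_accessibility_overlay grid accessible_set out) := by unfold Spec_render_accessibility_overlay; infer_instance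

-- ===== CLAIM (what is proved, stated in full; the proofs are below) =====
def Claim_equal_render_accessibility_overlay : Prop := ∀ (grid : List String) (accessible_set : List (Int × Int)), Dom_render_accessibility_overlay grid accessible_set → Spec_render_accessibility_overlay grid accessible_set (render_accessibility_overlay grid accessible_set)

-- ===== LEMMAS AND PROOFS =====

-- canonical marked row: cell at column index s+k becomes 'x' iff it is '@' and (r, s+k) ∈ S
def markRowAux (S : List (Int × Int)) (r : Int) (s : Int) : List Char → List Char
  | [] => []
  | ch :: t => (if ch = '@' ∧ (r, s) ∈ S then 'x' else ch) :: markRowAux S r (s + 1) t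

-- canonical marked grid, rows indexed from s
def markGridAux (S : List (Int × Int)) (s : Int) : List (List Char) → List (List Char)
  | [] => []
  | row :: t => markRowAux S s 0 row :: markGridAux S (s + 1) t

theorem length_markRowAux (S : List (Int × Int)) (r : Int) :
    ∀ (l : List Char) (s : Int), (markRowAux S r s l).length = l.length := by
  intro l
  induction l with
  | nil => intro s; rfl
  | cons ch t ih => intro s; simp [markRowAux, ih]

theorem getElem?_markRowAux (S : List (Int × Int)) (r : Int) :
    ∀ (l : List Char) (s : Int) (k : Nat),
      (markRowAux S r s l)[k]? =
        l[k]?.map (fun ch => if ch = '@' ∧ (r, s + (k : Int)) ∈ S then 'x' else ch) := by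
  intro l
  induction l with
  | nil => intro s k; simp [markRowAux]
  | cons ch t ih =>
    intro s k
    cases k with
    | zero => simp [markRowAux]
    | succ k =>
      simp only [markRowAux, List.getElem?_cons_succ]
      rw [ih (s + 1) k]
      simp only [show s + 1 + (k : Int) = s + ((k + 1 : Nat) : Int) by push_cast; ring]

theorem length_markGridAux (S : List (Int × Int)) :
    ∀ (g : List (List Char)) (s : Int), (markGridAux S s g).length = g.length := by
  intro g
  induction g with
  | nil => intro s; rfl
  | cons row t ih => intro s; simp [markGridAux, ih]

theorem getElem?_markGridAux (S : List (Int × Int)) :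
    ∀ (g : List (List Char)) (s : Int) (k : Nat),
      (markGridAux S s g)[k]? = g[k]?.map (fun row => markRowAux S (s + (k : Int)) 0 row) := by
  intro g
  induction g with
  | nil => intro s k; simp [markGridAux]
  | cons row t ih =>
    intro s k
    cases k with
    | zero => simp [markGridAux]
    | succ k =>
      simp only [markGridAux, List.getElem?_cons_succ]
      rw [ih (s + 1) k]
      simp only [show s + 1 + (k : Int) = s + ((k + 1 : Nat) : Int) by push_cast; ring]

theorem markRowAux_nil (r : Int) : ∀ (l : List Char) (s : Int), markRowAux [] r s l = l := by
  intro l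
  induction l with
  | nil => intro s; rfl
  | cons ch t ih => intro s; simp [markRowAux, ih]

theorem markGridAux_nil : ∀ (g : List (List Char)) (s : Int), markGridAux [] s g = g := by
  intro g
  induction g with
  | nil => intro s; rfl
  | cons row t ih => intro s; simp [markGridAux, markRowAux_nil, ih]

-- A's inner loop over a row equals the canonical marked row
theorem aInner_fold (S : List (Int × Int)) (r : Int) :
    ∀ (l pre : List Char),
      (PySem.List.enumerate l (pre.length : Int)).foldl (aInner S r) (pre ++ l) =
        pre ++ markRowAux S r (pre.length : Int) l := by
  intro l
  induction l with
  | nil => intro pre; simp [PySem.List.enumerate_nil, markRowAux]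
  | cons ch t ih =>
    intro pre
    rw [PySem.List.enumerate_cons]
    simp only [List.foldl_cons]
    have hstep : aInner S r (pre ++ ch :: t) ((pre.length : Int), ch) =
        pre ++ (if ch = '@' ∧ (r, (pre.length : Int)) ∈ S then 'x' else ch) :: t := by
      unfold aInner
      by_cases h : ch = '@' ∧ (r, (pre.length : Int)) ∈ S
      · rw [if_pos h, if_pos h, PySem.List.pySetD_natCast]
        simp
      · rw [if_neg h, if_neg h]
    rw [hstep]
    set ch' := (if ch = '@' ∧ (r, (pre.length : Int)) ∈ S then 'x' else ch) with hch'
    have hlen : ((pre.length : Int) + 1) = (((pre ++ [ch']).length : Nat) : Int) := by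
      simp
    have hacc : pre ++ ch' :: t = (pre ++ [ch']) ++ t := by simp
    rw [hlen, hacc, ih (pre ++ [ch'])]
    simp only [markRowAux, ← hch']
    have : (((pre ++ [ch']).length : Nat) : Int) = (pre.length : Int) + 1 := by
      simp
    rw [this]
    simp

-- A's outer loop equals the canonical marked grid (mapped back to strings)
theorem aOuter_fold (S : List (Int × Int)) :
    ∀ (gs : List String) (acc : List String) (s : Nat),
      (PySem.List.enumerate gs (s : Int)).foldl (aOuter S) acc =
        acc ++ (markGridAux S (s : Int) (gs.map String.toList)).map String.mk := by
  intro gs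
  induction gs with
  | nil => intro acc s; simp [PySem.List.enumerate_nil, markGridAux]
  | cons row t ih =>
    intro acc s
    rw [PySem.List.enumerate_cons]
    simp only [List.foldl_cons]
    have h0 := aInner_fold S (s : Int) row.toList []
    simp only [List.length_nil, Nat.cast_zero, List.nil_append] at h0
    have hrow : aOuter S acc ((s : Int), row) =
        acc ++ [String.mk (markRowAux S (s : Int) 0 row.toList)] := by
      exact congrArg (fun l => acc ++ [String.mk l]) h0
    rw [hrow]
    have hs1 : ((s : Int) + 1) = ((s + 1 : Nat) : Int) := by push_cast; ring
    rw [hs1, ih (acc ++ [String.mk (markRowAux S (s : Int) 0 row.toList)]) (s + 1)]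
    simp only [markGridAux, List.map_cons, List.map_cons, List.append_assoc,
      List.singleton_append, ← hs1]

-- key commuting step for B: one bStep on a marked grid marks one more coordinate
theorem bStep_markGrid (P : List (Int × Int)) (p : Int × Int) (g : List (List Char)) :
    bStep (markGridAux P 0 g) p = markGridAux (P ++ [p]) 0 g := by
  obtain ⟨r, c⟩ := p
  apply List.ext_getElem?
  intro k
  rw [getElem?_markGridAux (P ++ [(r, c)]) g 0 k]
  unfold bStep
  by_cases hk : k < g.length
  · -- both sides are about row k
    obtain ⟨row, hrow⟩ : ∃ row, g[k]? = some row := ⟨g[k], List.getElem?_eq_getElem hk⟩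
    by_cases hrk : 0 ≤ r ∧ r < (g.length : Int) ∧ r.toNat = k
    · -- p addresses row k
      obtain ⟨hr0, hrlen, hrk'⟩ := hrk
      have hrk2 : r = (k : Int) := by omega
      have hglen : ((markGridAux P 0 g).length : Int) = (g.length : Int) := by
        rw [length_markGridAux]
      have hget : PySem.List.pyGetD (markGridAux P 0 g) r [] = markRowAux P r 0 row := by
        rw [hrk2, PySem.List.pyGetD_natCast]
        have := getElem?_markGridAux P g 0 k
        rw [hrow] at this
        simp only [Option.map_some] at this
        rw [List.getD_eq_getElem?_getD, this]
        simp
      rw [hget]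
      have hrowlen : (markRowAux P r 0 row).length = row.length := length_markRowAux P r row 0
      by_cases hc : 0 ≤ c ∧ c < (row.length : Int)
      · obtain ⟨hc0, hclen⟩ := hc
        have hcn : c = ((c.toNat : Nat) : Int) := by omega
        have hcl : c.toNat < row.length := by omega
        have hcell : PySem.List.pyGetD (markRowAux P r 0 row) c ' ' =
            (if row[c.toNat] = '@' ∧ (r, c) ∈ P then 'x' else row[c.toNat]) := by
          conv_lhs => rw [hcn, PySem.List.pyGetD_natCast]
          rw [List.getD_eq_getElem?_getD, getElem?_markRowAux P r row 0 c.toNat,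
            List.getElem?_eq_getElem hcl]
          simp only [Option.map_some, Option.getD_some, zero_add]
          rw [← hcn]
        rw [hcell]
        -- the condition reduces to: original cell is '@' and (r,c) ∉ P
        by_cases hA : row[c.toNat] = '@' ∧ (r, c) ∉ P
        · -- B sets the cell; RHS marks it via the appended pair
          have hcond : 0 ≤ r ∧ r < ((markGridAux P 0 g).length : Int) ∧ 0 ≤ c ∧
              c < ((markRowAux P r 0 row).length : Int) ∧
              (if row[c.toNat] = '@' ∧ (r, c) ∈ P then 'x' else row[c.toNat]) = '@' := by
            refine ⟨hr0, by omega, hc0, by rw [hrowlen]; omega, ?_⟩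
            simp [hA.1, hA.2]
          rw [if_pos hcond]
          rw [PySem.List.pySetD_of_nonneg _ _ hr0, PySem.List.pySetD_of_nonneg _ _ hc0]
          rw [List.getElem?_set, hrk', if_pos rfl, if_pos (by rw [length_markGridAux]; exact hk)]
          rw [hrow]
          simp only [Option.map_some, Option.some.injEq]
          -- row-level equality
          apply List.ext_getElem?
          intro j
          rw [List.getElem?_set, getElem?_markRowAux, getElem?_markRowAux]
          by_cases hj : c.toNat = j
          · subst hj
            rw [if_pos rfl, if_pos (by omega)]
            rw [List.getElem?_eq_getElem hcl]
            simp only [Option.map_some, Option.some.injEq, zero_add]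
            have hmem2 : ((k : Int), ((c.toNat : Nat) : Int)) ∈ P ++ [(r, c)] := by
              rw [← hrk2, ← hcn]; simp
            rw [if_pos ⟨hA.1, hmem2⟩]
          · rw [if_neg hj]
            congr 1
            funext ch
            have hmem : ((k : Int), ((j : Nat) : Int)) ∈ P ++ [(r, c)] ↔
                ((k : Int), ((j : Nat) : Int)) ∈ P := by
              simp only [List.mem_append, List.mem_singleton, Prod.mk.injEq]
              constructor
              · rintro (h | ⟨h1, h2⟩)
                · exact h
                · exfalso; apply hj; omega
              · exact Or.inl
            simp only [zero_add, ← hrk2] at hmem ⊢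
            simp only [hmem]
        · -- cell not set by B; RHS also leaves the row's cells as with P
          have hcondneg : ¬ (0 ≤ r ∧ r < ((markGridAux P 0 g).length : Int) ∧ 0 ≤ c ∧
              c < ((markRowAux P r 0 row).length : Int) ∧
              (if row[c.toNat] = '@' ∧ (r, c) ∈ P then 'x' else row[c.toNat]) = '@') := by
            rintro ⟨-, -, -, -, h5⟩
            apply hA
            by_cases hP : row[c.toNat] = '@' ∧ (r, c) ∈ P
            · rw [if_pos hP] at h5; exact absurd h5 (by decide)
            · rw [if_neg hP] at h5
              exact ⟨h5, fun hmem => hP ⟨h5, hmem⟩⟩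
          rw [if_neg hcondneg]
          rw [getElem?_markGridAux, hrow]
          simp only [Option.map_some, Option.some.injEq]
          -- rows agree since the marked cell is already 'x' or not '@'
          apply List.ext_getElem?
          intro j
          rw [getElem?_markRowAux, getElem?_markRowAux]
          cases hrj : row[j]? with
          | none => simp
          | some ch =>
            simp only [Option.map_some, Option.some.injEq, zero_add, ← hrk2]
            by_cases hj : ((j : Nat) : Int) = c
            · -- at column c: either already marked (x either way) or not '@' (unchanged)
              have hjc : j = c.toNat := by omega
              rw [hjc] at hrj
              have h3 := List.getElem?_eq_getElem hcl
              rw [hrj] at h3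
              have hv : row[c.toNat] = ch := ((Option.some.injEq _ _).mp h3).symm
              rw [hj]
              by_cases hch : ch = '@'
              · have hP : (r, c) ∈ P := by
                  by_contra hP
                  exact hA ⟨hv.trans hch, hP⟩
                rw [if_pos ⟨hch, hP⟩, if_pos ⟨hch, by simp [hP]⟩]
              · rw [if_neg (by tauto), if_neg (by tauto)]
            · have hmem : (r, ((j : Nat) : Int)) ∈ P ++ [(r, c)] ↔
                  (r, ((j : Nat) : Int)) ∈ P := by
                simp only [List.mem_append, List.mem_singleton, Prod.mk.injEq]
                constructor
                · rintro (h | ⟨-, h2⟩)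
                  · exact h
                  · exact absurd h2 hj
                · exact Or.inl
              simp only [hmem]
      · -- c out of range of the row: bStep is a no-op and no cell has column c
        rw [if_neg (by
          rintro ⟨-, -, h3, h4, -⟩
          rw [hrowlen] at h4
          exact hc ⟨h3, h4⟩)]
        rw [getElem?_markGridAux, hrow]
        simp only [Option.map_some, Option.some.injEq]
        apply List.ext_getElem?
        intro j
        rw [getElem?_markRowAux, getElem?_markRowAux]
        cases hrj : row[j]? with
        | none => simp
        | some ch =>
          simp only [Option.map_some, Option.some.injEq, zero_add, ← hrk2]
          have hjl : j < row.length := by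
            by_contra hge
            rw [List.getElem?_eq_none (by omega)] at hrj
            simp at hrj
          have hne : ¬ (((j : Nat) : Int) = c) := by omega
          have hmem : (r, ((j : Nat) : Int)) ∈ P ++ [(r, c)] ↔
              (r, ((j : Nat) : Int)) ∈ P := by
            simp only [List.mem_append, List.mem_singleton, Prod.mk.injEq]
            constructor
            · rintro (h | ⟨-, h2⟩)
              · exact h
              · exact absurd h2 hne
            · exact Or.inl
          simp only [hmem]
    · -- p does not address row k (out of range r, or different row)
      have hkr : ¬ ((k : Int) = r) := by
        intro h
        exact hrk ⟨by omega, by omega, by omega⟩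
      have htail : (markGridAux P 0 g)[k]? =
          Option.map (fun row => markRowAux (P ++ [(r, c)]) (0 + (k : Int)) 0 row) g[k]? := by
        rw [getElem?_markGridAux, hrow]
        simp only [Option.map_some, Option.some.injEq, zero_add]
        apply List.ext_getElem?
        intro j
        rw [getElem?_markRowAux, getElem?_markRowAux]
        cases row[j]? with
        | none => simp
        | some ch =>
          simp only [Option.map_some, Option.some.injEq, zero_add]
          have hmem : ((k : Int), ((j : Nat) : Int)) ∈ P ++ [(r, c)] ↔
              ((k : Int), ((j : Nat) : Int)) ∈ P := by
            simp only [List.mem_append, List.mem_singleton, Prod.mk.injEq]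
            constructor
            · rintro (h | ⟨h1, -⟩)
              · exact h
              · exact absurd h1 hkr
            · exact Or.inl
          simp only [hmem]
      split_ifs with hcond
      · have h0 : (0 : Int) ≤ r := hcond.1
        rw [PySem.List.pySetD_of_nonneg _ _ h0, List.getElem?_set,
          if_neg (show ¬ r.toNat = k by omega)]
        exact htail
      · exact htail
  · -- k out of range: both none
    have hlen2 : (markGridAux P 0 g).length = g.length := length_markGridAux P g 0
    have hknone : g[k]? = none := List.getElem?_eq_none (by omega)
    have htail : (markGridAux P 0 g)[k]? = none := by
      rw [getElem?_markGridAux, hknone]; rfl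
    rw [hknone]
    simp only [Option.map_none]
    split_ifs with h
    · have h0 : (0 : Int) ≤ r := h.1
      have hr2 : r < ((markGridAux P 0 g).length : Int) := h.2.1
      rw [hlen2] at hr2
      rw [PySem.List.pySetD_of_nonneg _ _ h0, List.getElem?_set,
        if_neg (show ¬ r.toNat = k by omega)]
      exact htail
    · exact htail

-- B's fold equals the canonical marked grid
theorem b_fold : ∀ (S P : List (Int × Int)) (g : List (List Char)),
    S.foldl bStep (markGridAux P 0 g) = markGridAux (P ++ S) 0 g := by
  intro S
  induction S with
  | nil => intro P g; simp
  | cons p t ih =>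
    intro P g
    simp only [List.foldl_cons]
    rw [bStep_markGrid P p g, ih (P ++ [p]) g]
    simp

-- ===== VERDICT (by name: the statement is the Claim_ definition above) =====
theorem render_accessibility_overlay_spec : Claim_equal_render_accessibility_overlay := by
  intro grid S _
  unfold Spec_render_accessibility_overlay
  unfold render_accessibility_overlay render_accessibility_overlay_alt
  have hA : (PySem.List.enumerate grid 0).foldl (aOuter S) [] =
      (markGridAux S 0 (grid.map String.toList)).map String.mk := by
    have := aOuter_fold S grid [] 0
    simpa using this
  have hB : S.foldl bStep (grid.map String.toList) = markGridAux S 0 (grid.map String.toList) := by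
    have := b_fold S [] (grid.map String.toList)
    simpa [markGridAux_nil] using this
  rw [hA, hB]
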